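-- pv_equiv track=rewrite | github.com/kinestheticfreq/ICP_Pset2 | 1a.py | findNumRepeats
-- ===== SOURCE A (Python) =====
-- def findNumRepeats(X):
--     if not X:
--         return 0  # In case of an empty string
--
--     repeats = {}
--
--     for char in X:
--         if char in repeats.keys():
--             repeats[char] += 1
--         else:
--             repeats[char] = 0
--     sum = 0
--     for key in repeats.keys():
--         sum += repeats[key]
--     return sum
-- ===== SOURCE B (Python) =====
-- def findNumRepeats(X):
--     if not X:
--         return 0  # preserve A's behaviour on empty/falsy input
--     return len(X) - len(set(X))
-- ===== Notes on version B (the rewrite author's own statement) =====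
-- stated objective: simpler
-- what changed: Replaced the counting-dict build plus per-key summation loop with the closed form len(X) - len(set(X)) (total length minus distinct count).
import Mathlib
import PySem

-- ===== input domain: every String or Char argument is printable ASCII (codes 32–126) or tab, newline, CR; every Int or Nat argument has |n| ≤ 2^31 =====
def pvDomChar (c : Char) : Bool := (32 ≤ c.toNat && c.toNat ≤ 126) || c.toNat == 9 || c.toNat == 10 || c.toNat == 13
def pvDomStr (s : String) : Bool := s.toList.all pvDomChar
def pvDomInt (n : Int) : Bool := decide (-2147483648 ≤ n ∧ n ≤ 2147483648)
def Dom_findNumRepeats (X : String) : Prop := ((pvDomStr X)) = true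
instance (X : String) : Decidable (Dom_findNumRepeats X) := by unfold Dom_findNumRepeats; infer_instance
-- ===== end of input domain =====

-- B replaces A's counting-dict build and per-key summation loop with the closed form
-- length minus number-of-distinct-characters (simpler; same asymptotic cost).


-- ===== PORT A =====
def findNumRepeats (X : String) : Int :=
  if X.toList = [] then 0
  else
    let repeats : PySem.Dict Char Int :=
      X.toList.foldl
        (fun d c => if d.contains c then d.modify c 0 (· + 1) else d.insert c 0)
        PySem.Dict.empty
    repeats.keys.foldl (fun s k => s + repeats.getD k 0) 0

-- ===== PORT B =====
def findNumRepeats_alt (X : String) : Int :=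
  if X.toList = [] then 0
  else (X.toList.length : Int) - ((PySem.Set.ofList X.toList).length : Int)

-- ===== PRECONDITION & SPEC =====
def Spec_findNumRepeats (X : String) (out : Int) : Prop := out = findNumRepeats_alt X
instance (X : String) (out : Int) : Decidable (Spec_findNumRepeats X out) := by unfold Spec_findNumRepeats; infer_instance

-- ===== CLAIM (what is proved, stated in full; the proofs are below) =====
def Claim_equal_findNumRepeats : Prop := ∀ (X : String), Dom_findNumRepeats X → Spec_findNumRepeats X (findNumRepeats X)

-- ===== LEMMAS AND PROOFS =====

-- the loop body of A's counting loop
def pvStep (d : PySem.Dict Char Int) (c : Char) : PySem.Dict Char Int :=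
  if d.contains c then d.modify c 0 (· + 1) else d.insert c 0

theorem pvContains_iff (items : List (Char × Int)) (c : Char) :
    (PySem.Dict.mk items).contains c = true ↔ c ∈ items.map Prod.fst := by
  simp [PySem.Dict.contains, List.any_eq_true]

-- when c is not a key, the replacement map is the identity
theorem pvMapId (items : List (Char × Int)) (c : Char) (v : Int)
    (h : c ∉ items.map Prod.fst) :
    items.map (fun p => if p.1 == c then (c, v) else p) = items := by
  induction items with
  | nil => rfl
  | cons p rest ih =>
      simp only [List.map_cons, List.mem_cons, not_or] at h
      have h1 : (p.1 == c) = false := by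
        simp only [beq_eq_false_iff_ne, ne_eq]
        exact fun hc => h.1 hc.symm
      rw [List.map_cons, h1, ih h.2]
      simp

-- replacing the unique pair with key c (value v) by (c, v+1) raises the value sum by 1
theorem pvSumReplace (c : Char) (items : List (Char × Int)) (v : Int)
    (hnd : (items.map Prod.fst).Nodup)
    (hget : (PySem.Dict.mk items).get? c = some v) :
    ((items.map (fun p => if p.1 == c then (c, v + 1) else p)).map Prod.snd).sum
      = (items.map Prod.snd).sum + 1 := by
  induction items with
  | nil => simp [PySem.Dict.get?] at hget
  | cons p rest ih =>
      simp only [List.map_cons, List.nodup_cons] at hnd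
      by_cases hc : (p.1 == c) = true
      · have hpc : p.1 = c := beq_iff_eq.1 hc
        have hv : v = p.2 := by
          simp [PySem.Dict.get?, List.find?, hc] at hget; omega
        have hrest : c ∉ rest.map Prod.fst := hpc ▸ hnd.1
        have hmap : (p :: rest).map (fun p => if p.1 == c then (c, v + 1) else p)
            = (c, v + 1) :: rest := by
          rw [List.map_cons, if_pos hc, pvMapId rest c (v + 1) hrest]
        rw [hmap]
        simp [hv]
        omega
      · have hget' : (PySem.Dict.mk rest).get? c = some v := by
          simpa [PySem.Dict.get?, List.find?, hc] using hget
        rw [List.map_cons, if_neg hc, List.map_cons, List.sum_cons, List.map_cons,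
          List.sum_cons, ih hnd.2 hget']
        omega

-- a true contains yields a get? value
theorem pvGetOfContains (items : List (Char × Int)) (c : Char)
    (h : (PySem.Dict.mk items).contains c = true) :
    ∃ v, (PySem.Dict.mk items).get? c = some v := by
  simp only [PySem.Dict.contains, List.any_eq_true] at h
  rcases h with ⟨p, hp, hpc⟩
  have : (items.find? (fun q => q.1 == c)).isSome := by
    exact List.find?_isSome.2 ⟨p, hp, hpc⟩
  rcases Option.isSome_iff_exists.1 this with ⟨q, hq⟩
  exact ⟨q.2, by simp [PySem.Dict.get?, hq]⟩

-- unfold one pvStep, case contains = true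
theorem pvStep_items_true (items : List (Char × Int)) (c : Char) (v : Int)
    (h : (PySem.Dict.mk items).contains c = true)
    (hget : (PySem.Dict.mk items).get? c = some v) :
    (pvStep (PySem.Dict.mk items) c).items
      = items.map (fun p => if p.1 == c then (c, v + 1) else p) := by
  simp [pvStep, h, PySem.Dict.modify, PySem.Dict.insert, PySem.Dict.getD, hget]

theorem pvStep_items_false (items : List (Char × Int)) (c : Char)
    (h : ¬ (PySem.Dict.mk items).contains c = true) :
    (pvStep (PySem.Dict.mk items) c).items = items ++ [(c, 0)] := by
  simp [pvStep, h, PySem.Dict.insert]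

-- keys of the replacement map are unchanged
theorem pvKeysReplace (items : List (Char × Int)) (c : Char) (v : Int) :
    (items.map (fun p => if p.1 == c then (c, v) else p)).map Prod.fst
      = items.map Prod.fst := by
  induction items with
  | nil => rfl
  | cons p rest ih =>
      rw [List.map_cons, List.map_cons, List.map_cons, ih]
      by_cases hc : (p.1 == c) = true
      · rw [if_pos hc]; simp [beq_iff_eq.1 hc]
      · rw [if_neg hc]

-- main invariant of A's counting loop
theorem pvLoopInv (l : List Char) :
    ∀ (items : List (Char × Int)), (items.map Prod.fst).Nodup →
    (((l.foldl pvStep (PySem.Dict.mk items)).items.map Prod.fst).Nodup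
      ∧ ((l.foldl pvStep (PySem.Dict.mk items)).items.map Prod.snd).sum
          + ((l.foldl pvStep (PySem.Dict.mk items)).items.length : Int)
          = (items.map Prod.snd).sum + (items.length : Int) + (l.length : Int)
      ∧ (l.foldl pvStep (PySem.Dict.mk items)).items.map Prod.fst
          = PySem.Set.update (items.map Prod.fst) l) := by
  induction l with
  | nil =>
      intro items hnd
      exact ⟨hnd, by simp, by simp [PySem.Set.update]⟩
  | cons c l ih =>
      intro items hnd
      by_cases hc : (PySem.Dict.mk items).contains c = true
      · rcases pvGetOfContains items c hc with ⟨v, hget⟩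
        have hitems := pvStep_items_true items c v hc hget
        have hd : pvStep (PySem.Dict.mk items) c
            = PySem.Dict.mk (items.map (fun p => if p.1 == c then (c, v + 1) else p)) := by
          cases hstep : pvStep (PySem.Dict.mk items) c with
          | mk it => simp only [hstep] at hitems; simp [hitems]
        have hnd' : ((items.map (fun p => if p.1 == c then (c, v + 1) else p)).map Prod.fst).Nodup := by
          rw [pvKeysReplace]; exact hnd
        rcases ih _ hnd' with ⟨h1, h2, h3⟩
        refine ⟨by simpa [hd] using h1, ?_, ?_⟩
        · have hsum := pvSumReplace c items v hnd hget
          have hlen : (items.map (fun p => if p.1 == c then (c, v + 1) else p)).length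
              = items.length := by simp
          simp only [List.foldl_cons, hd] at *
          rw [h2, hsum, hlen]
          simp; omega
        · have hmem : c ∈ items.map Prod.fst := (pvContains_iff items c).1 hc
          have hadd : PySem.Set.add (items.map Prod.fst) c = items.map Prod.fst := by
            simp [PySem.Set.add, PySem.Set.contains]
            rcases List.mem_map.1 hmem with ⟨⟨a, b⟩, hp, rfl⟩
            exact ⟨b, hp⟩
          simp only [List.foldl_cons, hd, h3, pvKeysReplace, PySem.Set.update,
            List.foldl_cons, hadd]
      · have hitems := pvStep_items_false items c hc
        have hd : pvStep (PySem.Dict.mk items) c = PySem.Dict.mk (items ++ [(c, 0)]) := by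
          cases hstep : pvStep (PySem.Dict.mk items) c with
          | mk it => simp only [hstep] at hitems; simp [hitems]
        have hmem : c ∉ items.map Prod.fst := fun h => hc ((pvContains_iff items c).2 h)
        have hmem' : ∀ (a : Char) (x : Int), (a, x) ∈ items → ¬ a = c := by
          intro a x hax hac
          exact hmem (hac ▸ List.mem_map.2 ⟨(a, x), hax, rfl⟩)
        have hnd' : (((items ++ [(c, 0)]).map Prod.fst)).Nodup := by
          simp only [List.map_append, List.map_cons, List.map_nil]
          rw [List.nodup_append]
          refine ⟨hnd, List.nodup_singleton c, ?_⟩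
          intro a ha b hb
          have hbc : b = c := by simpa using hb
          subst hbc
          rcases List.mem_map.1 ha with ⟨⟨a', x⟩, hax, rfl⟩
          exact hmem' a' x hax
        rcases ih _ hnd' with ⟨h1, h2, h3⟩
        refine ⟨by simpa [hd] using h1, ?_, ?_⟩
        · simp only [List.foldl_cons, hd] at *
          rw [h2]; simp; omega
        · have hadd : PySem.Set.add (items.map Prod.fst) c = items.map Prod.fst ++ [c] := by
            simp [PySem.Set.add, PySem.Set.contains]
            intro x hx
            exact hmem' c x hx rfl
          simp only [List.foldl_cons, hd, h3, PySem.Set.update, List.foldl_cons, hadd,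
            List.map_append, List.map_cons, List.map_nil]

-- get? finds the pair itself when keys are nodup
theorem pvGetMem (items : List (Char × Int)) (hnd : (items.map Prod.fst).Nodup) :
    ∀ p ∈ items, (PySem.Dict.mk items).get? p.1 = some p.2 := by
  induction items with
  | nil => intro p hp; simp at hp
  | cons q rest ih =>
      simp only [List.map_cons, List.nodup_cons] at hnd
      intro p hp
      rcases List.mem_cons.1 hp with rfl | hp'
      · simp [PySem.Dict.get?, List.find?]
      · have hne : ¬ (q.1 == p.1) = true := by
          simp only [beq_iff_eq]
          intro h; exact hnd.1 (h ▸ List.mem_map.2 ⟨p, hp', rfl⟩)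
        have := ih hnd.2 p hp'
        simpa [PySem.Dict.get?, List.find?, hne] using this

-- A's summation loop equals the sum of the stored values
theorem pvSumKeys (items : List (Char × Int)) (hnd : (items.map Prod.fst).Nodup) :
    ((PySem.Dict.mk items).keys).foldl
        (fun s k => s + (PySem.Dict.mk items).getD k 0) 0
      = (items.map Prod.snd).sum := by
  rw [PySem.List.foldl_add]
  have : (PySem.Dict.mk items).keys.map (fun k => (PySem.Dict.mk items).getD k 0)
      = items.map Prod.snd := by
    simp only [PySem.Dict.keys, List.map_map]
    apply List.map_congr_left
    intro p hp
    simp [Function.comp, PySem.Dict.getD, pvGetMem items hnd p hp]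
  rw [this]; simp

-- ===== VERDICT (by name: the statement is the Claim_ definition above) =====
theorem findNumRepeats_spec : Claim_equal_findNumRepeats := by
  intro X _
  unfold Spec_findNumRepeats findNumRepeats findNumRepeats_alt
  by_cases h : X.toList = []
  · simp [h]
  · simp only [h, if_false]
    have hinv := pvLoopInv X.toList [] (by simp)
    rcases hinv with ⟨h1, h2, h3⟩
    have hfold : X.toList.foldl
        (fun d c => if d.contains c then d.modify c 0 (· + 1) else d.insert c 0)
        PySem.Dict.empty
        = X.toList.foldl pvStep (PySem.Dict.mk []) := rfl
    rw [hfold, pvSumKeys _ h1]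
    have h3' : (X.toList.foldl pvStep (PySem.Dict.mk [])).items.map Prod.fst
        = PySem.Set.update ([] : List Char) X.toList := by simpa using h3
    have hofList : PySem.Set.ofList X.toList = PySem.Set.update ([] : List Char) X.toList := rfl
    rw [hofList, ← h3']
    simp only [List.map_nil, List.sum_nil, List.length_nil, List.length_map] at h2 ⊢
    have hXl : (X.toList.length : Int) = (X.length : Int) := by simp
    omega
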